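-- pv_equiv track=rewrite | github.com/T-Python-Sep-24/LAB_FUNCTIONS_101 | StringPattern_bonus.py | returnTriangle
-- ===== SOURCE A (Python) =====
-- def returnTriangle(x:int):
--     ''' This function returns a Triangle of numbers. It takes an ineger number which is the width of the Triangle. '''
--     pattren = ''
--     for i in range(x):
--         for j in range(x - i):
--             value = x - j - i
--             pattren += f'{value} '
--         pattren += '\n'
--     return pattren
-- ===== SOURCE B (Python) =====
-- def returnTriangle(x: int):
--     ''' This function returns a Triangle of numbers. It takes an ineger number which is the width of the Triangle. '''
--     tokens = [f'{v} ' for v in range(x, 0, -1)]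
--     rows = []
--     for i in range(x):
--         rows.append(''.join(tokens[i:]) + '\n')
--     return ''.join(rows)
-- ===== Notes on version B (the rewrite author's own statement) =====
-- stated objective: faster
-- what changed: B precomputes the top row as a token table once and emits each row as a joined suffix of that table collected in a row list joined at the end, instead of A's inner loop re-formatting every cell and repeatedly extending one growing string.
import Mathlib
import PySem

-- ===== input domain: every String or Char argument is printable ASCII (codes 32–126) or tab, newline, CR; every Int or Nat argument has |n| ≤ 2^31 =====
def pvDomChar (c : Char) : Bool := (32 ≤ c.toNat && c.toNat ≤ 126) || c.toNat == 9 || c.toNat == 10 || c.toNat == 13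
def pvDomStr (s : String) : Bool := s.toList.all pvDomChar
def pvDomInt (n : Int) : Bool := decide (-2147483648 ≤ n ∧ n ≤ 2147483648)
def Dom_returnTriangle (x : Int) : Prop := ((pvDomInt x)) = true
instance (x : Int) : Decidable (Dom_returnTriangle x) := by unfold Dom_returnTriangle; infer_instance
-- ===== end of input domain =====

-- B builds the top row once as a token table and emits each row as a joined suffix of it,
-- replacing A's inner loop that re-formats every cell (objective: alternative decomposition).

-- ===== PORT A =====
def returnTriangle (x : Int) : String :=
  String.ofList <|
    (PySem.List.pyRange 0 x 1).foldl (fun pattren i =>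
      ((PySem.List.pyRange 0 (x - i) 1).foldl (fun p j =>
        p ++ (PySem.Int.toChars (x - j - i) ++ [' '])) pattren) ++ ['\n']) []

-- ===== PORT B =====
def returnTriangle_alt (x : Int) : String :=
  let tokens : List (List Char) :=
    (PySem.List.pyRange x 0 (-1)).map (fun v => PySem.Int.toChars v ++ [' '])
  let rows : List (List Char) :=
    (PySem.List.pyRange 0 x 1).foldl (fun rows i =>
      rows ++ [PySem.Chars.join [] (PySem.List.slice tokens (some i) none) ++ ['\n']]) []
  String.ofList (PySem.Chars.join [] rows)

-- ===== PRECONDITION & SPEC =====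
def Spec_returnTriangle (x : Int) (out : String) : Prop := out = returnTriangle_alt x
instance (x : Int) (out : String) : Decidable (Spec_returnTriangle x out) := by unfold Spec_returnTriangle; infer_instance

-- ===== CLAIM (what is proved, stated in full; the proofs are below) =====
def Claim_equal_returnTriangle : Prop := ∀ (x : Int), Dom_returnTriangle x → Spec_returnTriangle x (returnTriangle x)

-- ===== LEMMAS AND PROOFS =====

-- ''.join with empty separator is flatten
theorem join_nil_eq_flatten (ls : List (List Char)) : PySem.Chars.join [] ls = ls.flatten := by
  induction ls with
  | nil => simp [PySem.Chars.join_nil]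
  | cons h t ih =>
    cases t with
    | nil => simp [PySem.Chars.join_singleton]
    | cons h2 t2 => rw [PySem.Chars.join_cons_cons]; simp_all

-- countdown range extended one step at the right end
theorem pyRange_neg_one_snoc (c : Int) (n : Nat) :
    PySem.List.pyRange c (c - ((n : Int) + 1)) (-1)
      = PySem.List.pyRange c (c - (n : Int)) (-1) ++ [c - n] := by
  rw [PySem.List.pyRange_neg_one_eq_reverse, PySem.List.pyRange_neg_one_eq_reverse]
  have h1 : c - ((n : Int) + 1) + 1 = c - n := by ring
  have h2 : PySem.List.pyRange (c - n) (c + 1) 1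
      = (c - n) :: PySem.List.pyRange (c - n + 1) (c + 1) 1 :=
    PySem.List.pyRange_one_cons (by omega)
  rw [h1, h2]
  simp

-- flatten of a singleton-producing flatMap is the plain flatMap
theorem flatten_flatMap_singleton (l : List Int) (h : Int → List Char) :
    (List.flatMap (fun i => [h i]) l).flatten = List.flatMap (fun i => h i) l := by
  induction l with
  | nil => simp
  | cons a t ih => simp [List.flatMap_cons, ih]

-- A's inner loop over range(x-i) equals the flattened token suffix (c = x - i, n = (x-i).toNat)
theorem rowA_eq (c : Int) (n : Nat) (pat : List Char) :
    (PySem.List.pyRange 0 (n : Nat) 1).foldl (fun p j =>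
        p ++ (PySem.Int.toChars (c - j) ++ [' '])) pat
      = pat ++ ((PySem.List.pyRange c (c - (n : Nat)) (-1)).map
          (fun v => PySem.Int.toChars v ++ [' '])).flatten := by
  induction n generalizing pat with
  | zero => simp [PySem.List.pyRange_one_eq_nil, PySem.List.pyRange_neg_one_eq_nil]
  | succ n ih =>
    have hr : PySem.List.pyRange 0 ((n : Int) + 1) 1
        = PySem.List.pyRange 0 (n : Int) 1 ++ [(n : Int)] :=
      PySem.List.pyRange_one_succ_right (by omega)
    push_cast
    rw [hr, List.foldl_append, ih, pyRange_neg_one_snoc c n]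
    simp

-- dropping k tokens from the countdown range shifts its start
theorem drop_pyRange_neg_one (k : Nat) (a : Int) :
    (PySem.List.pyRange a 0 (-1)).drop k = PySem.List.pyRange (a - k) 0 (-1) := by
  induction k generalizing a with
  | zero => simp
  | succ k ih =>
    by_cases h : 0 < a
    · rw [PySem.List.pyRange_neg_one_cons h]
      simp only [List.drop_succ_cons]
      rw [ih (a - 1)]
      congr 1
      push_cast
      ring
    · rw [PySem.List.pyRange_neg_one_eq_nil (by omega),
          PySem.List.pyRange_neg_one_eq_nil (by push_cast; omega)]
      simp

theorem returnTriangle_eq (x : Int) : returnTriangle x = returnTriangle_alt x := by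
  unfold returnTriangle returnTriangle_alt
  congr 1
  rw [join_nil_eq_flatten]
  -- A side: inner loop -> flattened countdown row, then the outer fold -> flatMap
  have hA : ∀ (pat : List Char) (i : Int), i ∈ PySem.List.pyRange 0 x 1 →
      ((PySem.List.pyRange 0 (x - i) 1).foldl (fun p j =>
          p ++ (PySem.Int.toChars (x - j - i) ++ [' '])) pat) ++ ['\n']
        = pat ++ (((PySem.List.pyRange (x - i) 0 (-1)).map
            (fun v => PySem.Int.toChars v ++ [' '])).flatten ++ ['\n']) := by
    intro pat i hi
    rw [PySem.List.mem_pyRange_one] at hi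
    have hn : x - i = ((x - i).toNat : Int) := by omega
    have hrow := rowA_eq (x - i) (x - i).toNat pat
    rw [← hn] at hrow
    have harg : (fun (p : List Char) (j : Int) => p ++ (PySem.Int.toChars (x - j - i) ++ [' ']))
        = (fun (p : List Char) (j : Int) => p ++ (PySem.Int.toChars ((x - i) - j) ++ [' '])) := by
      funext p j
      have : x - j - i = x - i - j := by ring
      rw [this]
    rw [harg, hrow]
    simp
  rw [PySem.List.foldl_congr_mem _ _
      (fun pat i => pat ++ (((PySem.List.pyRange (x - i) 0 (-1)).map
          (fun v => PySem.Int.toChars v ++ [' '])).flatten ++ ['\n'])) _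
      (fun acc i hi => hA acc i hi)]
  rw [PySem.List.foldl_append_eq_flatMap]
  -- B side: each appended row is the flattened countdown suffix of the token table
  have hB : ∀ (rows : List (List Char)) (i : Int), i ∈ PySem.List.pyRange 0 x 1 →
      rows ++ [PySem.Chars.join []
          (PySem.List.slice ((PySem.List.pyRange x 0 (-1)).map
            (fun v => PySem.Int.toChars v ++ [' '])) (some i) none) ++ ['\n']]
        = rows ++ [((PySem.List.pyRange (x - i) 0 (-1)).map
            (fun v => PySem.Int.toChars v ++ [' '])).flatten ++ ['\n']] := by
    intro rows i hi
    rw [PySem.List.mem_pyRange_one] at hi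
    rw [join_nil_eq_flatten, PySem.List.slice_from _ hi.1, ← List.map_drop,
        drop_pyRange_neg_one i.toNat x]
    have : x - (i.toNat : Int) = x - i := by omega
    rw [this]
  rw [PySem.List.foldl_congr_mem _ _
      (fun rows i => rows ++ [((PySem.List.pyRange (x - i) 0 (-1)).map
          (fun v => PySem.Int.toChars v ++ [' '])).flatten ++ ['\n']]) _
      (fun acc i hi => hB acc i hi)]
  rw [PySem.List.foldl_append_eq_flatMap]
  simp only [List.nil_append]
  rw [flatten_flatMap_singleton]

-- ===== VERDICT (by name: the statement is the Claim_ definition above) =====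
theorem returnTriangle_spec : Claim_equal_returnTriangle := by
  intro x _
  unfold Spec_returnTriangle
  exact returnTriangle_eq x
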